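-- pv_equiv track=rewrite | github.com/OpenSiFli/kicad-libraries | src/kicad_generator/footprints.py | bga_row_names
-- ===== SOURCE A (Python) =====
-- import itertools
-- from string import ascii_uppercase
-- from typing import Any, Iterable, Mapping, Sequence
--
-- def bga_row_names(count: int) -> list[str]:
--     """Generate BGA row names compatible with the upstream grid_array generator.
--
--     The upstream implementation skips visually confusing letters (I, O, Q, S, X, Z)
--     and then continues with multi-letter row names (AA, AB, ...).
--
--     Args:
--         count: Number of row names to generate.
--
--     Returns:
--         List of row names, length == count.
--     """
--
--     if count < 0:
--         msg = "Row count must be non-negative."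
--         raise ValueError(msg)
--     if count == 0:
--         return []
--
--     alphabet = [ch for ch in ascii_uppercase if ch not in "IOQSXZ"]
--
--     def row_name_generator() -> Iterable[str]:
--         for n in itertools.count(1):
--             for item in itertools.product(alphabet, repeat=n):
--                 yield "".join(item)
--
--     return list(itertools.islice(row_name_generator(), count))
-- ===== SOURCE B (Python) =====
-- from string import ascii_uppercase
--
--
-- def bga_row_names(count: int) -> list[str]:
--     """Generate BGA row names by converting each index to bijective base-20."""
--     if count < 0:
--         msg = "Row count must be non-negative."
--         raise ValueError(msg)
--
--     alphabet = [ch for ch in ascii_uppercase if ch not in "IOQSXZ"]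
--
--     result = []
--     for i in range(count):
--         m = i + 1
--         digits = []
--         while m:
--             m, r = divmod(m - 1, 20)
--             digits.append(alphabet[r])
--         result.append("".join(reversed(digits)))
--     return result
-- ===== Notes on version B (the rewrite author's own statement) =====
-- stated objective: alternative
-- what changed: Replaces the itertools.product/islice enumeration of ever-longer letter tuples with a direct per-index conversion of each row number to its bijective-base name over the same skip-letter alphabet.
import Mathlib
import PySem

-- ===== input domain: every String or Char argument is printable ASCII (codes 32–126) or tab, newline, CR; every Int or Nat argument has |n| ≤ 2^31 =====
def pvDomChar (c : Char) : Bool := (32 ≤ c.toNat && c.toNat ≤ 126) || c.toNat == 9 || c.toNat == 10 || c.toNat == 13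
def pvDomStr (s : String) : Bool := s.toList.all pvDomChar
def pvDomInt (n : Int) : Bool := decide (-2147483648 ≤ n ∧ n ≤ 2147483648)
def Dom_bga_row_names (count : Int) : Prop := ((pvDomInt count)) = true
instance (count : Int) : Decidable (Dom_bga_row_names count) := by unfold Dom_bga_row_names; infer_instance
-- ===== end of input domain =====

-- B replaces the itertools.product/islice enumeration with a direct per-index
-- bijective-base conversion of each row number (alternative algorithm, same cost).

-- ===== PORT A =====

-- alphabet = [ch for ch in ascii_uppercase if ch not in "IOQSXZ"]
def alphabetA : List Char :=
  "ABCDEFGHIJKLMNOPQRSTUVWXYZ".toList.filter (fun ch => !("IOQSXZ".toList.contains ch))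

-- itertools.product(pool, repeat=n), transcribed as its documented fold implementation:
-- result = [[]]; for pool in pools: result = [x+[y] for x in result for y in pool]
def pyProduct (pools : List (List Char)) : List (List Char) :=
  pools.foldl (fun acc pool => acc.flatMap (fun x => pool.map (fun y => x ++ [y]))) [[]]

def prodA (n : Nat) : List (List Char) := pyProduct (List.replicate n alphabetA)

theorem prodA_succ (n : Nat) :
    prodA (n + 1) = (prodA n).flatMap (fun x => alphabetA.map (fun y => x ++ [y])) := by
  simp [prodA, pyProduct, List.replicate_succ' (n := n), List.foldl_append]

theorem prodA_length (n : Nat) : (prodA n).length = 20 ^ n := by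
  induction n with
  | zero => simp [prodA, pyProduct]
  | succ n ih =>
    have ha : alphabetA.length = 20 := by decide
    rw [prodA_succ, List.length_flatMap]
    simp [ih, ha, pow_succ, Nat.mul_comm]

-- islice(generator, count): take `remaining` names, starting at block length n,
-- consuming each block prodA n and joining the tuples ("".join(item)).
def sliceGenA (remaining n : Nat) : List String :=
  if remaining = 0 then []
  else
    let block := (prodA n).map (fun item => String.mk item)
    if remaining ≤ block.length then block.take remaining
    else block ++ sliceGenA (remaining - block.length) (n + 1)
termination_by remaining
decreasing_by
  have h20 : 0 < 20 ^ n := Nat.pow_pos (a := 20) (by norm_num)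
  simp only [List.length_map, prodA_length] at *
  omega

def bga_row_names (count : Int) : List String :=
  if count < 0 then []               -- A raises ValueError here (excluded by Pre_)
  else if count = 0 then []
  else sliceGenA count.toNat 1

-- ===== PORT B =====

def alphabetB : List Char :=
  "ABCDEFGHIJKLMNOPQRSTUVWXYZ".toList.filter (fun ch => !("IOQSXZ".toList.contains ch))

-- while m: m, r = divmod(m-1, 20); digits.append(alphabet[r])  — then reversed(digits).
-- alphabet[r] with 0 ≤ r < 20 = len(alphabet) always, so getD is exact here.
def digitsLoopB (m : Nat) (acc : List Char) : List Char :=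
  if _h : m = 0 then acc.reverse
  else digitsLoopB ((m - 1) / 20) (acc ++ [alphabetB.getD ((m - 1) % 20) 'A'])
termination_by m
decreasing_by
  have := Nat.div_le_self (m - 1) 20
  omega

def bga_row_names_alt (count : Int) : List String :=
  if count < 0 then []               -- B raises ValueError here (excluded by Pre_)
  else (List.range count.toNat).map (fun i => String.mk (digitsLoopB (i + 1) []))

-- ===== PRECONDITION & SPEC =====
-- Pre_ excludes exactly count < 0, where the Python A raises ValueError.
def Pre_bga_row_names (count : Int) : Prop := 0 ≤ count
instance (count : Int) : Decidable (Pre_bga_row_names count) := by unfold Pre_bga_row_names; infer_instance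
def pvWitness_bga_row_names : Int := (25)

def Spec_bga_row_names (count : Int) (out : List String) : Prop := out = bga_row_names_alt count
instance (count : Int) (out : List String) : Decidable (Spec_bga_row_names count out) := by unfold Spec_bga_row_names; infer_instance

-- ===== CLAIM (what is proved, stated in full; the proofs are below) =====
def Claim_equal_bga_row_names : Prop := ∀ (count : Int), Dom_bga_row_names count → Pre_bga_row_names count → Spec_bga_row_names count (bga_row_names count)

-- ===== LEMMAS AND PROOFS =====

-- the canonical digit string of m in bijective base 20 (empty for m = 0)
def nameNat (m : Nat) : List Char :=
  match m with
  | 0 => []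
  | k + 1 => nameNat (k / 20) ++ [alphabetA.getD (k % 20) 'A']
termination_by m
decreasing_by
  have := Nat.div_le_self k 20
  omega

-- first m with an n-digit name
def cbase (n : Nat) : Nat :=
  match n with
  | 0 => 0
  | k + 1 => 20 * cbase k + 1

theorem cbase_succ (n : Nat) : cbase (n + 1) = cbase n + 20 ^ n := by
  induction n with
  | zero => simp [cbase]
  | succ n ih => simp only [cbase, pow_succ] at *; omega

theorem map_getD_range {α β : Type} (f : α → β) (l : List α) (d : α) :
    l.map f = (List.range l.length).map (fun i => f (l.getD i d)) := by
  apply List.ext_getElem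
  · simp
  · intro i h1 h2
    simp at h2 ⊢
    rw [List.getElem?_eq_getElem h2]
    rfl

theorem range_mul_flatMap {α : Type} (N M : Nat) (f : Nat → Nat → α) :
    (List.range N).flatMap (fun p => (List.range M).map (f p))
      = (List.range (N * M)).map (fun j => f (j / M) (j % M)) := by
  induction N with
  | zero => simp
  | succ N ih =>
    rw [List.range_succ, List.flatMap_append, ih, Nat.succ_mul, List.range_add,
      List.map_append]
    congr 1
    · simp only [List.flatMap_cons, List.flatMap_nil, List.append_nil, List.map_map]
      apply List.map_congr_left
      intro k hk
      simp only [List.mem_range] at hk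
      have hM : 0 < M := by omega
      have hdiv : (N * M + k) / M = N := by
        rw [Nat.add_comm, Nat.add_mul_div_right _ _ hM, Nat.div_eq_of_lt hk]
        omega
      have hmod : (N * M + k) % M = k := by
        rw [Nat.add_comm, Nat.add_mul_mod_self_right, Nat.mod_eq_of_lt hk]
      simp [hdiv, hmod]

theorem prodA_eq (n : Nat) :
    prodA n = (List.range (20 ^ n)).map (fun j => nameNat (cbase n + j)) := by
  induction n with
  | zero =>
    rw [show (20:Nat) ^ 0 = 1 from rfl]
    simp [prodA, pyProduct, cbase, List.range_succ, nameNat]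
  | succ n ih =>
    rw [prodA_succ, ih, List.flatMap_map]
    have h1 : ∀ p : Nat,
        alphabetA.map (fun y => nameNat (cbase n + p) ++ [y])
          = (List.range 20).map
              (fun r => nameNat (cbase n + p) ++ [alphabetA.getD r 'A']) := by
      intro p
      have := map_getD_range (fun y => nameNat (cbase n + p) ++ [y]) alphabetA 'A'
      simpa using this
    simp only [h1, range_mul_flatMap]
    rw [pow_succ]
    apply List.map_congr_left
    intro j hj
    have harg : cbase (n + 1) + j = (20 * cbase n + j) + 1 := by
      simp [cbase]; omega
    rw [harg]
    have hdiv : (20 * cbase n + j) / 20 = cbase n + j / 20 := by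
      rw [Nat.mul_add_div (by norm_num)]
    have hmod : (20 * cbase n + j) % 20 = j % 20 := by
      rw [Nat.mul_add_mod]
    simp [nameNat, hdiv, hmod]

theorem sliceGenA_eq (r : Nat) : ∀ n, sliceGenA r n
    = (List.range r).map (fun j => String.mk (nameNat (cbase n + j))) := by
  induction r using Nat.strong_induction_on with
  | _ r ih =>
    intro n
    rw [sliceGenA]
    by_cases h0 : r = 0
    · simp [h0]
    · simp only [h0, if_false]
      have hlen : ((prodA n).map (fun item => String.mk item)).length = 20 ^ n := by
        simp [prodA_length]
      have hblock : (prodA n).map (fun item => String.mk item)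
          = (List.range (20 ^ n)).map (fun j => String.mk (nameNat (cbase n + j))) := by
        rw [prodA_eq, List.map_map]; rfl
      by_cases hle : r ≤ ((prodA n).map (fun item => String.mk item)).length
      · simp only [hle, if_true]
        rw [hlen] at hle
        rw [hblock, ← List.map_take, List.take_range, Nat.min_eq_left hle]
      · simp only [hle, if_false]
        have h20 : 0 < 20 ^ n := Nat.pow_pos (a := 20) (by norm_num)
        rw [hlen] at hle
        rw [hlen, ih (r - 20 ^ n) (by omega) (n + 1), hblock]
        have hr : r = 20 ^ n + (r - 20 ^ n) := by omega
        conv_rhs => rw [hr]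
        rw [List.range_add, List.map_append, List.map_map]
        congr 1
        apply List.map_congr_left
        intro k hk
        simp [cbase_succ, Nat.add_assoc]

theorem digitsLoopB_eq (m : Nat) : ∀ acc, digitsLoopB m acc = nameNat m ++ acc.reverse := by
  induction m using Nat.strong_induction_on with
  | _ m ih =>
    intro acc
    rw [digitsLoopB]
    by_cases h0 : m = 0
    · simp [h0, nameNat]
    · simp only [h0, dif_neg, not_false_iff]
      have hlt : (m - 1) / 20 < m := by
        have := Nat.div_le_self (m - 1) 20
        omega
      rw [ih _ hlt]
      obtain ⟨k, rfl⟩ : ∃ k, m = k + 1 := ⟨m - 1, by omega⟩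
      simp [nameNat, alphabetB, alphabetA]

-- ===== VERDICT (by name: the statement is the Claim_ definition above) =====
theorem bga_row_names_spec : Claim_equal_bga_row_names := by
  intro count _ hpre
  unfold Spec_bga_row_names bga_row_names bga_row_names_alt
  unfold Pre_bga_row_names at hpre
  have hneg : ¬ count < 0 := by omega
  simp only [hneg, if_false]
  by_cases h0 : count = 0
  · simp [h0]
  · simp only [h0, if_false]
    rw [sliceGenA_eq]
    apply List.map_congr_left
    intro j _
    rw [digitsLoopB_eq]
    simp [cbase, Nat.add_comm]
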